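-- pv_equiv track=rewrite | github.com/AkashParmar91/searce | Day11/Practice/u1.py | minCost
-- ===== SOURCE A (Python) =====
-- from typing import List
--
-- def minCost(s: str, a: List[int]) -> int:
--     c=s[0];
--     mx=a[0]
--     sum=a[0];
--     for i in range(1,len(s)):
--         sum+=a[i];
--         if(s[i]==c):
--             mx=max(mx,a[i]);
--         else:
--             sum-=mx;
--             mx=a[i];
--             c=s[i];
--     sum-=mx;
--     return sum;
-- ===== SOURCE B (Python) =====
-- def minCost(s, a):
--     total = 0
--     i = 0
--     n = len(s)
--     while i < n:
--         # end of the maximal run of s[i]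
--         j = i
--         while j < n and s[j] == s[i]:
--             j += 1
--         costs = [a[k] for k in range(i, j)]
--         total += sum(costs) - max(costs)
--         i = j
--     return total
-- ===== Notes on version B (the rewrite author's own statement) =====
-- stated objective: alternative
-- what changed: B first delimits each maximal run of equal adjacent characters with an index scan and then does a per-run sum(costs)-max(costs) reduction over the run's cost entries, instead of A's single fused pass with running char/max/sum accumulators.
import Mathlib
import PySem

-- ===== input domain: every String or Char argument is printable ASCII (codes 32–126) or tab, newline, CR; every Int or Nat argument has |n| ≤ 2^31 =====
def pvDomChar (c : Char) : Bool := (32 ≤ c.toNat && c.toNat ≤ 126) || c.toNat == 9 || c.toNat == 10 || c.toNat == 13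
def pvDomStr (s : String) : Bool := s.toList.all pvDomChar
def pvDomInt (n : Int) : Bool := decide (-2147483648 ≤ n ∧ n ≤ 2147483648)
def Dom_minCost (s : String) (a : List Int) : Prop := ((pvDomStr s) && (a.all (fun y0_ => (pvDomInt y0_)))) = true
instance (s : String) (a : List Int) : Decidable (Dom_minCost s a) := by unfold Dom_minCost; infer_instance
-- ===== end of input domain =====

-- B groups s into maximal runs first and reduces each run's cost slice with sum - max,
-- instead of A's fused single pass with running char/max/sum accumulators (alternative decomposition, same cost).

-- ===== PORT A =====
-- loop body of A's for-loop, extracted as a helper (state = (c, mx, sum))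
def aStep (cs : List Char) (a : List Int) (st : Char × Int × Int) (i : Int) : Char × Int × Int :=
  let sm := st.2.2 + PySem.List.pyGetD a i 0
  if PySem.List.pyGetD cs i ' ' == st.1 then
    (st.1, max st.2.1 (PySem.List.pyGetD a i 0), sm)
  else
    (PySem.List.pyGetD cs i ' ', PySem.List.pyGetD a i 0, sm - st.2.1)

def minCost (s : String) (a : List Int) : Int :=
  let cs := s.toList
  let c := PySem.List.pyGetD cs 0 ' '      -- s[0]; Pre_ guarantees the index is in range
  let mx := PySem.List.pyGetD a 0 0        -- a[0]; Pre_ guarantees the index is in range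
  let st := (PySem.List.pyRange 1 (cs.length : Int)).foldl (aStep cs a) (c, mx, mx)
  st.2.2 - st.2.1

-- ===== PORT B =====
-- B's inner while loop: first j ≥ start with j = len or s[j] ≠ c.
-- (fuel = a structural bound on the remaining iterations, cs.length - j; it only makes the loop total)
def runEnd (cs : List Char) (c : Char) : Nat → Nat → Nat
  | 0, j => j
  | f + 1, j =>
    if h : j < cs.length then
      if cs[j] == c then runEnd cs c f (j + 1) else j
    else j

-- B's outer while loop (fuel likewise bounds the remaining iterations: i strictly increases each round)
def bLoop (cs : List Char) (a : List Int) : Nat → Nat → Int → Int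
  | 0, _, total => total
  | f + 1, i, total =>
    if h : i < cs.length then
      let j := runEnd cs cs[i] (cs.length - i) i
      let costs := (PySem.List.pyRange (i : Int) (j : Int)).map (fun k => PySem.List.pyGetD a k 0)
      bLoop cs a f j (total + costs.sum - (PySem.List.max? costs (fun x => x)).getD 0)
    else total

def minCost_alt (s : String) (a : List Int) : Int := bLoop s.toList a s.toList.length 0 0

-- ===== PRECONDITION & SPEC =====
-- Pre_ excludes exactly the inputs on which A raises IndexError: empty s (at s[0]) or a shorter than s (at a[i]).
def Pre_minCost (s : String) (a : List Int) : Prop := s.toList ≠ [] ∧ s.toList.length ≤ a.length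
instance (s : String) (a : List Int) : Decidable (Pre_minCost s a) := by unfold Pre_minCost; infer_instance

def pvWitness_minCost : String × List Int := ("aabba", [1, 3, 2, 4, 5])

def Spec_minCost (s : String) (a : List Int) (out : Int) : Prop := out = minCost_alt s a
instance (s : String) (a : List Int) (out : Int) : Decidable (Spec_minCost s a out) := by unfold Spec_minCost; infer_instance

-- ===== CLAIM (what is proved, stated in full; the proofs are below) =====
def Claim_equal_minCost : Prop := ∀ (s : String) (a : List Int), Dom_minCost s a → Pre_minCost s a → Spec_minCost s a (minCost s a)

-- ===== LEMMAS AND PROOFS =====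

theorem runEnd_oob (cs : List Char) (c : Char) (f i : Nat) (h : ¬ i < cs.length) :
    runEnd cs c f i = i := by
  cases f with
  | zero => rfl
  | succ f => rw [runEnd, dif_neg h]

theorem runEnd_stop (cs : List Char) (c : Char) (f i : Nat) (h : i < cs.length)
    (hc : ¬ (cs[i] == c) = true) : runEnd cs c (f + 1) i = i := by
  rw [runEnd, dif_pos h, if_neg hc]

theorem runEnd_cont (cs : List Char) (c : Char) (f i : Nat) (h : i < cs.length)
    (hc : (cs[i] == c) = true) : runEnd cs c (f + 1) i = runEnd cs c f (i + 1) := by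
  rw [runEnd]
  simp only [h, dite_true, hc, if_true]

theorem le_runEnd (cs : List Char) (c : Char) :
    ∀ (f i : Nat), i ≤ runEnd cs c f i := by
  intro f
  induction f with
  | zero => intro i; exact le_rfl
  | succ f ih =>
    intro i
    rw [runEnd]
    split_ifs with h1 h2
    · have := ih (i + 1)
      omega
    · exact le_rfl
    · exact le_rfl

theorem pyGetD_char (cs : List Char) (i : Nat) (h : i < cs.length) :
    PySem.List.pyGetD cs (i : Int) ' ' = cs[i] := by
  rw [PySem.List.pyGetD_natCast]
  exact List.getD_eq_getElem cs ' ' h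

-- A's for-loop rewritten as a structural recursion over the index (proof device)
def aAux (cs : List Char) (a : List Int) (i : Nat) (c : Char) (mx sm : Int) : Int :=
  if i < cs.length then
    let sm' := sm + PySem.List.pyGetD a (i : Int) 0
    if PySem.List.pyGetD cs (i : Int) ' ' == c then
      aAux cs a (i + 1) c (max mx (PySem.List.pyGetD a (i : Int) 0)) sm'
    else
      aAux cs a (i + 1) (PySem.List.pyGetD cs (i : Int) ' ') (PySem.List.pyGetD a (i : Int) 0) (sm' - mx)
  else sm - mx
termination_by cs.length - i

theorem fold_eq_aAux (cs : List Char) (a : List Int) :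
    ∀ (m i : Nat), cs.length - i ≤ m → ∀ (c : Char) (mx sm : Int),
    ((PySem.List.pyRange (i : Int) (cs.length : Int)).foldl (aStep cs a) (c, mx, sm)).2.2
      - ((PySem.List.pyRange (i : Int) (cs.length : Int)).foldl (aStep cs a) (c, mx, sm)).2.1
      = aAux cs a i c mx sm := by
  intro m
  induction m with
  | zero =>
    intro i hi c mx sm
    rw [PySem.List.pyRange_one_eq_nil (by exact_mod_cast Nat.le_of_sub_eq_zero (by omega))]
    rw [aAux]
    simp only [List.foldl_nil]
    rw [if_neg (by omega)]
  | succ m ih =>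
    intro i hi c mx sm
    by_cases h : i < cs.length
    · rw [PySem.List.pyRange_one_cons (by exact_mod_cast h)]
      rw [aAux, if_pos h]
      simp only [List.foldl_cons]
      rw [aStep]
      have hcast : (i : Int) + 1 = ((i + 1 : Nat) : Int) := by push_cast; ring
      split_ifs with hc
      · simp only [hcast]
        exact ih (i + 1) (by omega) c (max mx (PySem.List.pyGetD a (i : Int) 0))
          (sm + PySem.List.pyGetD a (i : Int) 0)
      · simp only [hcast]
        exact ih (i + 1) (by omega) _ _ _
    · rw [PySem.List.pyRange_one_eq_nil (by exact_mod_cast (by omega : cs.length ≤ i))]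
      rw [aAux, if_neg h]
      simp only [List.foldl_nil]

-- the outer while loop is linear in its accumulator
theorem bLoop_add (cs : List Char) (a : List Int) :
    ∀ (f i : Nat) (t : Int), bLoop cs a f i t = t + bLoop cs a f i 0 := by
  intro f
  induction f with
  | zero => intro i t; rw [bLoop, bLoop]; ring
  | succ f ih =>
    intro i t
    by_cases h : i < cs.length
    · rw [bLoop, bLoop]
      simp only [h, dite_true]
      have e1 := ih (runEnd cs cs[i] (cs.length - i) i)
      conv_lhs => rw [e1]
      conv_rhs => rw [e1]
      ring
    · rw [bLoop, bLoop]
      simp only [h, dite_false]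
      ring

-- position i's run end, one step in: strictly beyond i
theorem runEnd_gt (cs : List Char) (i : Nat) (h : i < cs.length) :
    i < runEnd cs cs[i] (cs.length - i) i := by
  rw [show cs.length - i = (cs.length - (i + 1)) + 1 from by omega,
      runEnd_cont cs cs[i] (cs.length - (i + 1)) i h (by simp)]
  have := le_runEnd cs cs[i] (cs.length - (i + 1)) (i + 1)
  omega

-- the outer loop's fuel is likewise irrelevant once it dominates the remaining positions
theorem bLoop_fuel (cs : List Char) (a : List Int) :
    ∀ (f f' i : Nat) (t : Int), cs.length - i ≤ f → cs.length - i ≤ f' →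
    bLoop cs a f i t = bLoop cs a f' i t := by
  intro f
  induction f with
  | zero =>
    intro f' i t hf hf'
    have h : ¬ i < cs.length := by omega
    cases f' with
    | zero => rfl
    | succ f' =>
      rw [bLoop, bLoop]
      simp only [h, dite_false]
  | succ f ih =>
    intro f' i t hf hf'
    by_cases h : i < cs.length
    · cases f' with
      | zero => omega
      | succ f' =>
        rw [bLoop, bLoop]
        simp only [h, dite_true]
        have hg := runEnd_gt cs i h
        have hle := le_runEnd cs cs[i] (cs.length - i) i
        exact ih f' (runEnd cs cs[i] (cs.length - i) i) _ (by omega) (by omega)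
    · cases f' with
      | zero => rw [bLoop, bLoop]; simp only [h, dite_false]
      | succ f' => rw [bLoop, bLoop]; simp only [h, dite_false]

-- MAIN INVARIANT: A's scan from position i with pending run-char c and pending max mx equals
-- the pending run's (sum - max)-contribution plus B's run loop from the end of that run.
theorem aAux_eq (cs : List Char) (a : List Int) :
    ∀ (m i : Nat), cs.length - i ≤ m → ∀ (c : Char) (mx sm : Int),
    aAux cs a i c mx sm =
      sm + ((PySem.List.pyRange (i : Int) ((runEnd cs c (cs.length - i) i : Nat) : Int)).map (fun k => PySem.List.pyGetD a k 0)).sum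
         - ((PySem.List.pyRange (i : Int) ((runEnd cs c (cs.length - i) i : Nat) : Int)).map (fun k => PySem.List.pyGetD a k 0)).foldl max mx
         + bLoop cs a (cs.length - i) (runEnd cs c (cs.length - i) i) 0 := by
  intro m
  induction m with
  | zero =>
    intro i hi c mx sm
    have h : ¬ i < cs.length := by omega
    have hf : cs.length - i = 0 := by omega
    rw [aAux, if_neg h, hf, runEnd_oob cs c 0 i h,
        PySem.List.pyRange_one_eq_nil le_rfl, bLoop]
    simp only [List.map_nil, List.sum_nil, List.foldl_nil]
    ring
  | succ m ih =>
    intro i hi c mx sm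
    by_cases h : i < cs.length
    · rw [aAux, if_pos h]
      simp only [pyGetD_char cs i h]
      have hcast : (i : Int) + 1 = ((i + 1 : Nat) : Int) := by push_cast; ring
      have hf : cs.length - i = (cs.length - (i + 1)) + 1 := by omega
      by_cases hc : (cs[i] == c) = true
      · rw [if_pos hc, ih (i + 1) (by omega), hf,
            runEnd_cont cs c (cs.length - (i + 1)) i h hc]
        have hir : (i : Int) < ((runEnd cs c (cs.length - (i + 1)) (i + 1) : Nat) : Int) := by
          have := le_runEnd cs c (cs.length - (i + 1)) (i + 1)
          exact_mod_cast (by omega : i < runEnd cs c (cs.length - (i + 1)) (i + 1))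
        rw [PySem.List.pyRange_one_cons hir]
        simp only [List.map_cons, List.sum_cons, List.foldl_cons, hcast]
        have hle := le_runEnd cs c (cs.length - (i + 1)) (i + 1)
        rw [bLoop_fuel cs a ((cs.length - (i + 1)) + 1) (cs.length - (i + 1))
              (runEnd cs c (cs.length - (i + 1)) (i + 1)) 0 (by omega) (by omega)]
        ring
      · rw [if_neg hc, ih (i + 1) (by omega), hf,
            runEnd_stop cs c (cs.length - (i + 1)) i h hc,
            PySem.List.pyRange_one_eq_nil le_rfl]
        simp only [List.map_nil, List.sum_nil, List.foldl_nil]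
        -- expand one round of B's outer loop at position i
        conv_rhs => rw [bLoop]
        simp only [h, dite_true]
        rw [show cs.length - i = (cs.length - (i + 1)) + 1 from by omega,
            runEnd_cont cs cs[i] (cs.length - (i + 1)) i h (by simp)]
        have hir : (i : Int) < ((runEnd cs cs[i] (cs.length - (i + 1)) (i + 1) : Nat) : Int) := by
          have := le_runEnd cs cs[i] (cs.length - (i + 1)) (i + 1)
          exact_mod_cast (by omega : i < runEnd cs cs[i] (cs.length - (i + 1)) (i + 1))
        rw [PySem.List.pyRange_one_cons hir]
        simp only [List.map_cons, List.sum_cons, PySem.List.max?_id_cons, Option.getD_some, hcast]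
        conv_rhs => rw [bLoop_add cs a (cs.length - (i + 1)) (runEnd cs cs[i] (cs.length - (i + 1)) (i + 1))]
        ring
    · have hf : cs.length - i = 0 := by omega
      rw [aAux, if_neg h, hf, runEnd_oob cs c 0 i h,
          PySem.List.pyRange_one_eq_nil le_rfl, bLoop]
      simp only [List.map_nil, List.sum_nil, List.foldl_nil]
      ring

theorem minCost_eq_alt (s : String) (a : List Int) (hne : s.toList ≠ []) :
    minCost s a = minCost_alt s a := by
  have hlen : 0 < s.toList.length := List.length_pos_iff.mpr hne
  simp only [minCost, minCost_alt]
  have h1 := fold_eq_aAux s.toList a s.toList.length 1 (by omega)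
      (PySem.List.pyGetD s.toList 0 ' ') (PySem.List.pyGetD a 0 0) (PySem.List.pyGetD a 0 0)
  push_cast at h1
  rw [h1, aAux_eq s.toList a s.toList.length 1 (by omega)]
  have hc0 : PySem.List.pyGetD s.toList 0 ' ' = s.toList[0] := by
    rw [PySem.List.pyGetD_ofNat']
    exact List.getD_eq_getElem s.toList ' ' hlen
  rw [hc0]
  -- expand B's first round (i = 0, fuel = length)
  conv_rhs => rw [show s.toList.length = (s.toList.length - 1) + 1 from by omega, bLoop]
  simp only [hlen, dite_true]
  rw [show s.toList.length - 0 = (s.toList.length - 1) + 1 from by omega,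
      runEnd_cont s.toList s.toList[0] (s.toList.length - 1) 0 hlen (by simp)]
  have hir : ((0 : Nat) : Int) < ((runEnd s.toList s.toList[0] (s.toList.length - 1) 1 : Nat) : Int) := by
    have := le_runEnd s.toList s.toList[0] (s.toList.length - 1) 1
    exact_mod_cast (by omega : (0 : Nat) < runEnd s.toList s.toList[0] (s.toList.length - 1) 1)
  rw [PySem.List.pyRange_one_cons hir]
  simp only [List.map_cons, List.sum_cons, PySem.List.max?_id_cons, Option.getD_some]
  conv_rhs => rw [bLoop_add s.toList a (s.toList.length - 1) (runEnd s.toList s.toList[0] (s.toList.length - 1) 1)]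
  push_cast
  ring

-- ===== VERDICT (by name: the statement is the Claim_ definition above) =====
theorem minCost_spec : Claim_equal_minCost := by
  intro s a _ hp
  exact minCost_eq_alt s a hp.1
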